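-- pv_equiv track=rewrite | github.com/ajay-1110/Python-Coderbyte-Challenges | Array Challenges/overlapping_ranges.py | overlappingranges
-- ===== SOURCE A (Python) =====
-- def overlappingranges(arr):
--     first_range = arr[:2]
--     second_range = arr[2:4]
--     overlap = arr[-1]
--     first_numbers = []
--     for i in range(first_range[0],first_range[1] + 1):
--         first_numbers.append(i)
--     second_numbers = []
--     for j in range(second_range[0],second_range[1] + 1):
--         second_numbers.append(j)
--     count = 0
--     if len(first_numbers) >= len(second_numbers):
--         for i in second_numbers:
--             if i in first_numbers:
--                 count += 1
--     elif len(first_numbers) <= len(second_numbers):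
--         for i in first_numbers:
--             if i in second_numbers:
--                 count += 1
--     if count == overlap:
--         return True
--     return False
-- ===== SOURCE B (Python) =====
-- def overlappingranges(arr):
--     a, b = arr[0], arr[1]
--     c, d = arr[2], arr[3]
--     overlap = arr[-1]
--     return max(0, min(b, d) - max(a, c) + 1) == overlap
-- ===== Notes on version B (the rewrite author's own statement) =====
-- stated objective: faster
-- what changed: Replaces materialising both integer ranges as lists and counting common elements with a nested membership scan by the closed-form interval-intersection size max(0, min(b,d)-max(a,c)+1).
import Mathlib
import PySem

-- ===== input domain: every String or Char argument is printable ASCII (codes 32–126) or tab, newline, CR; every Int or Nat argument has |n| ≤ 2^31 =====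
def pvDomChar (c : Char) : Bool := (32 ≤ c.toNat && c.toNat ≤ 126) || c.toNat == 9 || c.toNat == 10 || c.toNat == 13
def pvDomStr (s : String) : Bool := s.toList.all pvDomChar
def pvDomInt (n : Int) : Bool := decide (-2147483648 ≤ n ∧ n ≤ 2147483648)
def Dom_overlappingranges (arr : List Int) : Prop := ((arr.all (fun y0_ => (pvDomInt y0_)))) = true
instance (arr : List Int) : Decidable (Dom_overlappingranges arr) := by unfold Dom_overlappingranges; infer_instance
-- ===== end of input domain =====

-- B replaces A's two materialised ranges and nested membership scan by the O(1) closed-form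
-- intersection size max(0, min(b,d)-max(a,c)+1) == arr[-1]; objective: faster.

-- ===== PORT A =====
def overlappingranges (arr : List Int) : Bool :=
  let first_range := PySem.List.slice arr none (some 2)
  let second_range := PySem.List.slice arr (some 2) (some 4)
  match PySem.List.pyGet? arr (-1), PySem.List.pyGet? first_range 0, PySem.List.pyGet? first_range 1,
        PySem.List.pyGet? second_range 0, PySem.List.pyGet? second_range 1 with
  | some overlap, some f0, some f1, some s0, some s1 =>
      -- list.append is O(1) in CPython: transliterated as Array.push, read back as a List
      let first_numbers : List Int := ((PySem.List.pyRange f0 (f1 + 1) 1).foldl (fun acc i => acc.push i) (#[] : Array Int)).toList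
      let second_numbers : List Int := ((PySem.List.pyRange s0 (s1 + 1) 1).foldl (fun acc j => acc.push j) (#[] : Array Int)).toList
      let count : Int :=
        if second_numbers.length ≤ first_numbers.length then
          second_numbers.foldl (fun cnt i => if first_numbers.contains i then cnt + 1 else cnt) 0
        else if first_numbers.length ≤ second_numbers.length then
          first_numbers.foldl (fun cnt i => if second_numbers.contains i then cnt + 1 else cnt) 0
        else 0
      count == overlap
  | _, _, _, _, _ => false   -- IndexError: excluded by Pre_

-- ===== PORT B =====
def overlappingranges_alt (arr : List Int) : Bool :=
  ((PySem.List.pyGet? arr 0).bind fun a =>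
   (PySem.List.pyGet? arr 1).bind fun b =>
   (PySem.List.pyGet? arr 2).bind fun c =>
   (PySem.List.pyGet? arr 3).bind fun d =>
   (PySem.List.pyGet? arr (-1)).map fun overlap =>
     max 0 (min b d - max a c + 1) == overlap).getD false   -- getD false unreachable under Pre_ (IndexError)

-- ===== PRECONDITION & SPEC =====
-- A raises IndexError when len(arr) < 4 (missing range endpoint or empty arr for arr[-1]).
def Pre_overlappingranges (arr : List Int) : Prop := 4 ≤ arr.length
instance (arr : List Int) : Decidable (Pre_overlappingranges arr) := by unfold Pre_overlappingranges; infer_instance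
def pvWitness_overlappingranges : List Int := [1, 5, 3, 7, 3]

def Spec_overlappingranges (arr : List Int) (out : Bool) : Prop := out = overlappingranges_alt arr
instance (arr : List Int) (out : Bool) : Decidable (Spec_overlappingranges arr out) := by unfold Spec_overlappingranges; infer_instance

-- ===== CLAIM (what is proved, stated in full; the proofs are below) =====
def Claim_equal_overlappingranges : Prop := ∀ (arr : List Int), Dom_overlappingranges arr → Pre_overlappingranges arr → Spec_overlappingranges arr (overlappingranges arr)

-- ===== LEMMAS AND PROOFS =====

-- Elements of [lo, hi) lying in [A, B) are counted by the closed form (min hi B - max lo A).toNat.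
theorem countP_pyRange_window (A B : Int) : ∀ (lo hi : Int),
    (PySem.List.pyRange lo hi 1).countP (fun i => decide (A ≤ i ∧ i < B))
      = (min hi B - max lo A).toNat := by
  intro lo hi
  by_cases h : hi ≤ lo
  · rw [PySem.List.pyRange_one_eq_nil h]
    simp only [List.countP_nil]
    omega
  · have hlt : lo < hi := by omega
    have ih := countP_pyRange_window A B (lo + 1) hi
    rw [PySem.List.pyRange_one_cons hlt, List.countP_cons, ih]
    by_cases hm : A ≤ lo ∧ lo < B
    · rw [decide_eq_true hm]
      simp only [if_true]
      omega
    · rw [decide_eq_false hm]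
      simp only [Bool.false_eq_true, if_false]
      omega
termination_by lo hi => (hi - lo).toNat
decreasing_by omega

theorem count_fold_eq (a b c d : Int) :
    (PySem.List.pyRange c d 1).foldl
        (fun cnt i => if (PySem.List.pyRange a b 1).contains i then cnt + 1 else cnt) (0 : Int)
      = ((min d b - max c a).toNat : Int) := by
  rw [PySem.List.foldl_count_if (fun i => (PySem.List.pyRange a b 1).contains i)]
  have : (PySem.List.pyRange c d 1).countP (fun i => (PySem.List.pyRange a b 1).contains i)
      = (PySem.List.pyRange c d 1).countP (fun i => decide (a ≤ i ∧ i < b)) := by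
    apply List.countP_congr
    intro i _
    simp [PySem.List.mem_pyRange_one]
  rw [this, countP_pyRange_window a b c d]
  omega

-- ===== VERDICT (by name: the statement is the Claim_ definition above) =====
theorem overlappingranges_spec : Claim_equal_overlappingranges := by
  intro arr _ hpre
  unfold Pre_overlappingranges at hpre
  match arr, hpre with
  | a :: b :: c :: d :: rest, _ =>
    unfold Spec_overlappingranges overlappingranges overlappingranges_alt
    have h2 : PySem.List.slice (a :: b :: c :: d :: rest) none (some 2) = [a, b] := by
      rw [PySem.List.slice_to _ (by norm_num)]; rfl
    have h4 : PySem.List.slice (a :: b :: c :: d :: rest) (some 2) (some 4) = [c, d] := by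
      rw [PySem.List.slice_toNat _ (by norm_num) (by norm_num)]; rfl
    rw [h2, h4, PySem.List.pyGet?_neg_one]
    have hlast : ∃ v, (a :: b :: c :: d :: rest).getLast? = some v :=
      ⟨_, List.getLast?_eq_some_getLast (by simp)⟩
    obtain ⟨ov, hov⟩ := hlast
    rw [hov]
    simp only [PySem.List.pyGet?_zero_cons]
    have hb : PySem.List.pyGet? [a, b] 1 = some b := by rfl
    have hd : PySem.List.pyGet? [c, d] 1 = some d := by rfl
    have g1 : PySem.List.pyGet? (a :: b :: c :: d :: rest) 1 = some b := by
      simp [PySem.List.pyGet?, PySem.List.pyIdx?]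
      all_goals (rw [if_pos (by omega)]; rfl)
    have g2 : PySem.List.pyGet? (a :: b :: c :: d :: rest) 2 = some c := by
      simp [PySem.List.pyGet?, PySem.List.pyIdx?]
      all_goals (rw [if_pos (by omega)]; rfl)
    have g3 : PySem.List.pyGet? (a :: b :: c :: d :: rest) 3 = some d := by
      simp [PySem.List.pyGet?, PySem.List.pyIdx?]
      all_goals (rw [if_pos (by omega)]; rfl)
    rw [hb, hd, g1, g2, g3]
    simp only [Option.bind_some, Option.map_some, Option.getD_some]
    simp only [List.foldl_push_eq_append', Array.toList_append, Array.toList_empty, List.nil_append]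
    by_cases hlen : (PySem.List.pyRange c (d + 1) 1).length ≤ (PySem.List.pyRange a (b + 1) 1).length
    · rw [if_pos hlen, count_fold_eq a (b + 1) c (d + 1)]
      have hval : ((min (d + 1) (b + 1) - max c a).toNat : Int) = max 0 (min b d - max a c + 1) := by
        omega
      rw [hval]
    · rw [if_neg hlen, if_pos (by omega), count_fold_eq c (d + 1) a (b + 1)]
      have hval : ((min (b + 1) (d + 1) - max a c).toNat : Int) = max 0 (min b d - max a c + 1) := by
        omega
      rw [hval]
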